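-- pv_equiv track=rewrite | github.com/miliar/Code_Jam_Webscraper | solutions_python/solutions_year17_round0_nr3/1987.py | solve
-- ===== SOURCE A (Python) =====
-- def solve(n, k):
--     if k == 1:
--         return n//2, (n-1)//2
--
--     if n % 2 == 0:
--         if k % 2 == 0:
--             return(solve(int(n/2), int(k/2)))
--         if k % 2 > 0:
--             return(solve(int(n/2-1), int((k-1)/2)))
--
--     if n % 2 > 0:
--         return(solve(n//2, k//2))
-- ===== SOURCE B (Python) =====
-- def solve(n, k):
--     # Iterative reformulation: thread (n, k) through a while loop instead of the call stack.
--     while k != 1: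
--         if n % 2 == 0:
--             if k % 2 == 0:
--                 n, k = n // 2, k // 2
--             else:
--                 n, k = n // 2 - 1, (k - 1) // 2
--         else:
--             n, k = n // 2, k // 2
--     return n // 2, (n - 1) // 2
-- ===== Notes on version B (the rewrite author's own statement) =====
-- stated objective: simpler
-- what changed: Replaces the halving recursion by an iterative while loop threading (n, k) as plain state, with uniform floor division instead of per-branch float-division expressions.
import Mathlib
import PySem

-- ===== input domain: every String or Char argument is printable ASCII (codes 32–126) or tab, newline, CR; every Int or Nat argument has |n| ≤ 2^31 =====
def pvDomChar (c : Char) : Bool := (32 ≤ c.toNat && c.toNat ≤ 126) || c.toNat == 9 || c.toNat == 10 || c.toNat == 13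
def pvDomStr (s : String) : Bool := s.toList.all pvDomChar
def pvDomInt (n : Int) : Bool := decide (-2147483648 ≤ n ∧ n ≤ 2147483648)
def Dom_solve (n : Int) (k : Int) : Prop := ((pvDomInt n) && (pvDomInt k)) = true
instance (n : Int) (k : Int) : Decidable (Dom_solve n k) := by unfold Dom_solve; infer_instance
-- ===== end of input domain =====

-- B replaces A's halving recursion by a while loop threading (n, k) as state; objective: simpler.

-- ===== PORT A =====
-- A's recursion, fuel-guarded (Python recurses unboundedly for k ≤ 0; fuel only makes it total).
-- int(n/2) truncates toward zero: ported as Int.tdiv (exact on the n-even / k-parity branches where it is used,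
-- since |n|, |k| ≤ 2^31 keep the float division exact there).
def solveGo : Nat → Int → Int → Option (Int × Int)
  | f, n, k =>
    if k = 1 then some (PySem.Int.floordiv n 2, PySem.Int.floordiv (n - 1) 2)
    else
      match f with
      | 0 => none
      | f + 1 =>
        if PySem.Int.mod n 2 = 0 then
          if PySem.Int.mod k 2 = 0 then solveGo f (Int.tdiv n 2) (Int.tdiv k 2)
          else if 0 < PySem.Int.mod k 2 then solveGo f (Int.tdiv n 2 - 1) (Int.tdiv (k - 1) 2)
          else none  -- Python falls through and returns None (unreachable: k % 2 ∈ {0, 1})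
        else if 0 < PySem.Int.mod n 2 then
          solveGo f (PySem.Int.floordiv n 2) (PySem.Int.floordiv k 2)
        else none  -- unreachable: n % 2 ∈ {0, 1}

def solve (n : Int) (k : Int) : Int × Int := (solveGo (k.toNat + 1) n k).getD (0, 0)

-- ===== PORT B =====
-- B's while loop: update the state (n, k) until k = 1, then compute the answer from the final n.
def solveLoop : Nat → Int → Int → Option Int
  | f, n, k =>
    if k = 1 then some n
    else
      match f with
      | 0 => none
      | f + 1 =>
        if PySem.Int.mod n 2 = 0 then
          if PySem.Int.mod k 2 = 0 then
            solveLoop f (PySem.Int.floordiv n 2) (PySem.Int.floordiv k 2)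
          else
            solveLoop f (PySem.Int.floordiv n 2 - 1) (PySem.Int.floordiv (k - 1) 2)
        else
          solveLoop f (PySem.Int.floordiv n 2) (PySem.Int.floordiv k 2)

def solve_alt (n : Int) (k : Int) : Int × Int :=
  match solveLoop (k.toNat + 1) n k with
  | some m => (PySem.Int.floordiv m 2, PySem.Int.floordiv (m - 1) 2)
  | none => (0, 0)

-- ===== PRECONDITION & SPEC =====
-- Python A raises RecursionError for every k ≤ 0 (k never reaches 1), so only k ≥ 1 is admitted.
def Pre_solve (n : Int) (k : Int) : Prop := 1 ≤ k
instance (n : Int) (k : Int) : Decidable (Pre_solve n k) := by unfold Pre_solve; infer_instance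
def pvWitness_solve : Int × Int := (10, 3)

def Spec_solve (n : Int) (k : Int) (out : Int × Int) : Prop := out = solve_alt n k
instance (n : Int) (k : Int) (out : Int × Int) : Decidable (Spec_solve n k out) := by unfold Spec_solve; infer_instance

-- ===== CLAIM (what is proved, stated in full; the proofs are below) =====
def Claim_equal_solve : Prop := ∀ (n : Int) (k : Int), Dom_solve n k → Pre_solve n k → Spec_solve n k (solve n k)

-- ===== LEMMAS AND PROOFS =====

theorem mod_two_cases (n : Int) : PySem.Int.mod n 2 = 0 ∨ PySem.Int.mod n 2 = 1 := by
  have h := PySem.Int.mod_eq_emod_of_pos (a := n) (b := 2) (by norm_num)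
  omega

theorem tdiv_eq_floordiv_of_even (n : Int) (h : PySem.Int.mod n 2 = 0) :
    Int.tdiv n 2 = PySem.Int.floordiv n 2 := by
  have he := PySem.Int.mod_eq_emod_of_pos (a := n) (b := 2) (by norm_num)
  have hf := PySem.Int.floordiv_eq_ediv_of_pos (a := n) (b := 2) (by norm_num)
  obtain ⟨m, hm⟩ : (2 : Int) ∣ n := by omega
  subst hm
  rw [hf, Int.mul_tdiv_cancel_left _ (by norm_num), Int.mul_ediv_cancel_left _ (by norm_num)]

theorem solveGo_eq_loop (f : Nat) (n k : Int) :
    solveGo f n k =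
      (solveLoop f n k).map (fun m => (PySem.Int.floordiv m 2, PySem.Int.floordiv (m - 1) 2)) := by
  induction f generalizing n k with
  | zero =>
    rw [solveGo, solveLoop]
    by_cases h : k = 1 <;> simp [h]
  | succ f ih =>
    rw [solveGo, solveLoop]
    by_cases h1 : k = 1
    · simp [h1]
    · simp only [if_neg h1]
      rcases mod_two_cases n with hn | hn
      · rcases mod_two_cases k with hk | hk
        · simp only [hn, hk]
          rw [tdiv_eq_floordiv_of_even n hn, tdiv_eq_floordiv_of_even k hk, ih]
          simp
        · have hkm : (k - 1) % 2 = 0 := by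
            have := PySem.Int.mod_eq_emod_of_pos (a := k) (b := 2) (by norm_num)
            omega
          have hke : PySem.Int.mod (k - 1) 2 = 0 := by
            rw [PySem.Int.mod_eq_emod_of_pos (a := k - 1) (b := 2) (by norm_num)]; exact hkm
          simp only [hn, hk]
          rw [tdiv_eq_floordiv_of_even n hn, tdiv_eq_floordiv_of_even (k - 1) hke]
          simp only [ih]
          norm_num
      · simp only [hn]
        simp only [ih]
        norm_num

-- ===== VERDICT (by name: the statement is the Claim_ definition above) =====
theorem solve_spec : Claim_equal_solve := by
  intro n k _ _
  unfold Spec_solve solve solve_alt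
  rw [solveGo_eq_loop]
  cases solveLoop (k.toNat + 1) n k <;> simp
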